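-- pv_equiv track=rewrite | github.com/oceanwhiskey/codeforces | seven_integers/seven_integers.py | calc_sums_of_last_four_elements_minus_third
-- ===== SOURCE A (Python) =====
-- def calc_sums_of_last_four_elements_minus_third(a):
--     n = len(a)
--     first_sum = sum(map(a.__getitem__, range(1,5))) - a[0]
--     sums = [first_sum]
--     for i in range(1,n-4):
--         first_sum = first_sum + a[i-1] - 2*a[i] + a[i+4]
--         sums.append(first_sum)
--     return sums
-- ===== SOURCE B (Python) =====
-- def calc_sums_of_last_four_elements_minus_third(a):
--     sums = [a[1] + a[2] + a[3] + a[4] - a[0]]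
--     for i in range(1, len(a) - 4):
--         sums.append(a[i+1] + a[i+2] + a[i+3] + a[i+4] - a[i])
--     return sums
-- ===== Notes on version B (the rewrite author's own statement) =====
-- stated objective: simpler
-- what changed: B computes each window sum directly from the list instead of maintaining A's loop-carried running-sum accumulator updated by the telescoping a[i-1]-2*a[i]+a[i+4] delta.
import Mathlib
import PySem

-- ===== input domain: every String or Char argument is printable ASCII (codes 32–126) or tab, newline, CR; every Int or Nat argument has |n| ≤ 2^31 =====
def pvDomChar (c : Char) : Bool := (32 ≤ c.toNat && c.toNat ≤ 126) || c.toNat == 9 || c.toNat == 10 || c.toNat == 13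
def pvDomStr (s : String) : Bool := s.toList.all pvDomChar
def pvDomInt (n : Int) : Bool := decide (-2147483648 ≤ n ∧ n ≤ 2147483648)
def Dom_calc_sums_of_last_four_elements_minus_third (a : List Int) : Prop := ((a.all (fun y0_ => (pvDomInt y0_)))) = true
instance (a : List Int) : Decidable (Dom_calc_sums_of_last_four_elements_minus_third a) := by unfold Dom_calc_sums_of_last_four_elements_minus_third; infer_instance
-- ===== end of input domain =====

-- B replaces A's loop-carried running-sum accumulator by a direct per-window computation (simpler).


-- ===== PORT A =====
-- Literal port of A; a[j] is PySem.List.pyGetD (default irrelevant: Pre_ guarantees every index is in range).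
def calc_sums_of_last_four_elements_minus_third (a : List Int) : List Int :=
  let n : Int := a.length
  let first_sum : Int :=
    ((PySem.List.pyRange 1 5 1).map (fun j => PySem.List.pyGetD a j 0)).sum
      - PySem.List.pyGetD a 0 0
  let st :=
    (PySem.List.pyRange 1 (n - 4) 1).foldl
      (fun (st : Int × List Int) i =>
        let fs := st.1 + PySem.List.pyGetD a (i - 1) 0 - 2 * PySem.List.pyGetD a i 0
                    + PySem.List.pyGetD a (i + 4) 0
        (fs, st.2 ++ [fs]))
      (first_sum, [first_sum])
  st.2

-- ===== PORT B =====
def calc_sums_of_last_four_elements_minus_third_alt (a : List Int) : List Int :=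
  let sums : List Int :=
    [PySem.List.pyGetD a 1 0 + PySem.List.pyGetD a 2 0 + PySem.List.pyGetD a 3 0
       + PySem.List.pyGetD a 4 0 - PySem.List.pyGetD a 0 0]
  (PySem.List.pyRange 1 ((a.length : Int) - 4) 1).foldl
    (fun (sums : List Int) i =>
      sums ++ [PySem.List.pyGetD a (i + 1) 0 + PySem.List.pyGetD a (i + 2) 0
                 + PySem.List.pyGetD a (i + 3) 0 + PySem.List.pyGetD a (i + 4) 0
                 - PySem.List.pyGetD a i 0])
    sums

-- ===== PRECONDITION & SPEC =====
-- Both A and B raise IndexError for lists shorter than 5; Pre_ excludes exactly those.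
def Pre_calc_sums_of_last_four_elements_minus_third (a : List Int) : Prop := 5 ≤ a.length
instance (a : List Int) : Decidable (Pre_calc_sums_of_last_four_elements_minus_third a) := by
  unfold Pre_calc_sums_of_last_four_elements_minus_third; infer_instance
def pvWitness_calc_sums_of_last_four_elements_minus_third : List Int := [3, 1, 4, 1, 5, 9]

def Spec_calc_sums_of_last_four_elements_minus_third (a : List Int) (out : List Int) : Prop := out = calc_sums_of_last_four_elements_minus_third_alt a
instance (a : List Int) (out : List Int) : Decidable (Spec_calc_sums_of_last_four_elements_minus_third a out) := by unfold Spec_calc_sums_of_last_four_elements_minus_third; infer_instance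

-- ===== CLAIM (what is proved, stated in full; the proofs are below) =====
def Claim_equal_calc_sums_of_last_four_elements_minus_third : Prop := ∀ (a : List Int), Dom_calc_sums_of_last_four_elements_minus_third a → Pre_calc_sums_of_last_four_elements_minus_third a → Spec_calc_sums_of_last_four_elements_minus_third a (calc_sums_of_last_four_elements_minus_third a)

-- ===== LEMMAS AND PROOFS =====

-- the direct window value B computes at index i
def pvWin (a : List Int) (i : Int) : Int :=
  PySem.List.pyGetD a (i + 1) 0 + PySem.List.pyGetD a (i + 2) 0
    + PySem.List.pyGetD a (i + 3) 0 + PySem.List.pyGetD a (i + 4) 0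
    - PySem.List.pyGetD a i 0

-- A's accumulator update turns window i-1 into window i (pure ring identity on pyGetD values)
theorem pvWin_step (a : List Int) (i : Int) :
    pvWin a (i - 1) + PySem.List.pyGetD a (i - 1) 0 - 2 * PySem.List.pyGetD a i 0
      + PySem.List.pyGetD a (i + 4) 0 = pvWin a i := by
  unfold pvWin
  have h1 : i - 1 + 1 = i := by ring
  have h2 : i - 1 + 2 = i + 1 := by ring
  have h3 : i - 1 + 3 = i + 2 := by ring
  have h4 : i - 1 + 4 = i + 3 := by ring
  rw [h1, h2, h3, h4]; ring

-- snd of A's fold appends exactly the window values, by induction on the range length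
theorem pvFoldA (a : List Int) :
    ∀ (m : Nat) (b : Int) (sums : List Int),
      ((PySem.List.pyRange b (b + m) 1).foldl
        (fun (st : Int × List Int) i =>
          let fs := st.1 + PySem.List.pyGetD a (i - 1) 0 - 2 * PySem.List.pyGetD a i 0
                      + PySem.List.pyGetD a (i + 4) 0
          (fs, st.2 ++ [fs]))
        (pvWin a (b - 1), sums)).2
      = sums ++ (PySem.List.pyRange b (b + m) 1).map (pvWin a) := by
  intro m
  induction m with
  | zero => intro b sums; simp [PySem.List.pyRange_one_eq_nil]
  | succ k ih =>
    intro b sums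
    rw [PySem.List.pyRange_one_cons (by omega : b < b + (k + 1 : Nat))]
    simp only [List.foldl_cons, List.map_cons]
    have hs : (b : Int) + (k + 1 : Nat) = (b + 1) + (k : Nat) := by push_cast; ring
    have hb : b + 1 - 1 = b := by ring
    rw [pvWin_step a b, hs]
    have := ih (b + 1) (sums ++ [pvWin a b])
    rw [hb] at this
    rw [this, List.append_assoc]; rfl

-- the first window: A's map-sum over range(1,5) minus a[0] is pvWin a 0
theorem pvFirst (a : List Int) :
    ((PySem.List.pyRange 1 5 1).map (fun j => PySem.List.pyGetD a j 0)).sum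
      - PySem.List.pyGetD a 0 0 = pvWin a 0 := by
  have h : PySem.List.pyRange 1 5 1 = [1, 2, 3, 4] := by decide
  rw [h]; unfold pvWin
  simp [List.sum_cons]
  ring

-- ===== VERDICT (by name: the statement is the Claim_ definition above) =====
theorem calc_sums_of_last_four_elements_minus_third_spec : Claim_equal_calc_sums_of_last_four_elements_minus_third := by
  intro a _ _
  unfold Spec_calc_sums_of_last_four_elements_minus_third
  unfold calc_sums_of_last_four_elements_minus_third calc_sums_of_last_four_elements_minus_third_alt
  simp only []
  rw [PySem.List.foldl_append_singleton_eq_map]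
  rw [pvFirst a]
  by_cases h : (a.length : Int) - 4 ≤ 1
  · rw [PySem.List.pyRange_one_eq_nil h]; simp [pvWin]
  · push Not at h
    have hm : (a.length : Int) - 4 = 1 + ((a.length : Int) - 5).toNat := by omega
    rw [hm]
    have h0 : pvWin a 0 = pvWin a ((1 : Int) - 1) := by norm_num
    rw [h0, pvFoldA a ((a.length : Int) - 5).toNat 1 [pvWin a ((1:Int) - 1)]]
    simp [pvWin]
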